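-- pv_equiv track=rewrite | github.com/JuanmaGuzman/CAPSTONE_backenc | src/publications/helpers/validation.py | check_for_duplicate_sku
-- ===== SOURCE A (Python) =====
-- from typing import Union
--
-- def check_for_duplicate_sku(
--     pub_items: dict
-- ) -> tuple[bool, Union[set[str], None]]:
--     sku_list = [item['sku'] for item in pub_items]
--     sku_set = set(sku_list)
--     if len(sku_list) != len(sku_set):
--         return True, None
--     return False, sku_set
-- ===== SOURCE B (Python) =====
-- from typing import Union
--
-- def check_for_duplicate_sku(
--     pub_items: dict
-- ) -> tuple[bool, Union[set[str], None]]: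
--     # One pass with a running `seen` set and a duplicate flag; no intermediate
--     # list and no second length comparison.  The loop never early-returns, so a
--     # missing 'sku' key raises KeyError exactly where A's comprehension does.
--     seen = set()
--     dup = False
--     for item in pub_items:
--         s = item['sku']
--         if s in seen:
--             dup = True
--         seen.add(s)
--     if dup:
--         return True, None
--     return False, seen
-- ===== Notes on version B (the rewrite author's own statement) =====
-- stated objective: alternative
-- what changed: Instead of materialising the full sku list, building a set from it and comparing lengths, B makes a single pass keeping a running seen-set and a duplicate flag set when an sku is already present.
import Mathlib
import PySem

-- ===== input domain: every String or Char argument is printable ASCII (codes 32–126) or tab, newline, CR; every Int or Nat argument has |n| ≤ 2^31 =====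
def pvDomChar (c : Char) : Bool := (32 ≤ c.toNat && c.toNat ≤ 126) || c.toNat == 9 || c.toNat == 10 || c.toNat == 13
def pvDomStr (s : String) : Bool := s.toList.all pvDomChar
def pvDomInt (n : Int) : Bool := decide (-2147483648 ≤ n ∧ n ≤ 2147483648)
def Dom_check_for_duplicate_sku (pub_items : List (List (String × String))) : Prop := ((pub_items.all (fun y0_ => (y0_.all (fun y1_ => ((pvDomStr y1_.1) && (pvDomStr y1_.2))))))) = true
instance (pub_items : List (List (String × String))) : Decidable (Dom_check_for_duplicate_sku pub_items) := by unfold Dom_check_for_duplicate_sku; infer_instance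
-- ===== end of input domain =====

-- B replaces A's list-then-set-then-length-comparison by a single pass with a running seen-set and a duplicate flag (alternative decomposition, same cost).


-- item['sku']: Python raises KeyError when the key is missing; Pre_ excludes that,
-- so the .getD "" default is never reached on admitted inputs.
def pvSku (item : List (String × String)) : String :=
  ((PySem.Dict.mk item).get? "sku").getD ""

-- ===== PORT A =====
def check_for_duplicate_sku (pub_items : List (List (String × String))) : Bool × Option (List String) :=
  let sku_list := pub_items.map pvSku
  let sku_set := PySem.Set.ofList sku_list
  if sku_list.length ≠ sku_set.length then (true, none)
  else (false, some sku_set)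

-- ===== PORT B =====
def check_for_duplicate_sku_alt (pub_items : List (List (String × String))) : Bool × Option (List String) :=
  let st := pub_items.foldl
    (fun (acc : Bool × PySem.Set String) item =>
      (acc.1 || PySem.Set.contains acc.2 (pvSku item), PySem.Set.add acc.2 (pvSku item)))
    (false, PySem.Set.empty)
  if st.1 then (true, none) else (false, some st.2)

-- ===== PRECONDITION & SPEC =====
-- Pre_ excludes exactly the inputs where some item lacks the 'sku' key, on which Python's A raises KeyError.
def Pre_check_for_duplicate_sku (pub_items : List (List (String × String))) : Prop :=
  ∀ item ∈ pub_items, (PySem.Dict.mk item).contains "sku" = true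
instance (pub_items : List (List (String × String))) : Decidable (Pre_check_for_duplicate_sku pub_items) := by unfold Pre_check_for_duplicate_sku; infer_instance
def pvWitness_check_for_duplicate_sku : (List (List (String × String))) := ([[("sku", "a")], [("sku", "b")]])
def Spec_check_for_duplicate_sku (pub_items : List (List (String × String))) (out : Bool × Option (List String)) : Prop := out = check_for_duplicate_sku_alt pub_items
instance (pub_items : List (List (String × String))) (out : Bool × Option (List String)) : Decidable (Spec_check_for_duplicate_sku pub_items out) := by unfold Spec_check_for_duplicate_sku; infer_instance

-- ===== CLAIM (what is proved, stated in full; the proofs are below) =====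
def Claim_equal_check_for_duplicate_sku : Prop := ∀ (pub_items : List (List (String × String))), Dom_check_for_duplicate_sku pub_items → Pre_check_for_duplicate_sku pub_items → Spec_check_for_duplicate_sku pub_items (check_for_duplicate_sku pub_items)

-- ===== LEMMAS AND PROOFS =====

theorem pv_len_add_le (s : PySem.Set String) (x : String) :
    (PySem.Set.add s x).length ≤ s.length + 1 := by
  unfold PySem.Set.add
  split
  · exact Nat.le_succ _
  · simp

theorem pv_len_update_le (l : List String) (s : PySem.Set String) :
    (PySem.Set.update s l).length ≤ s.length + l.length := by
  induction l generalizing s with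
  | nil => simp [PySem.Set.update]
  | cons x t ih =>
      have h1 := ih (PySem.Set.add s x)
      have h2 := pv_len_add_le s x
      have : PySem.Set.update s (x :: t) = PySem.Set.update (PySem.Set.add s x) t := rfl
      rw [this]
      simp only [List.length_cons]
      omega

theorem pv_len_add_of_contains (s : PySem.Set String) (x : String)
    (h : PySem.Set.contains s x = true) : (PySem.Set.add s x).length = s.length := by
  have hm : x ∈ s := by simpa using h
  unfold PySem.Set.add
  simp [hm]

theorem pv_len_add_of_not_contains (s : PySem.Set String) (x : String)
    (h : PySem.Set.contains s x = false) : (PySem.Set.add s x).length = s.length + 1 := by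
  have hm : x ∉ s := by simpa using h
  unfold PySem.Set.add
  simp [hm]

theorem pv_foldl_dup (l : List String) (b : Bool) (s : PySem.Set String) :
    l.foldl (fun (acc : Bool × PySem.Set String) x =>
        (acc.1 || PySem.Set.contains acc.2 x, PySem.Set.add acc.2 x)) (b, s)
      = (b || decide ((PySem.Set.update s l).length ≠ s.length + l.length),
         PySem.Set.update s l) := by
  induction l generalizing b s with
  | nil => simp [PySem.Set.update]
  | cons x t ih =>
      have hup : PySem.Set.update s (x :: t) = PySem.Set.update (PySem.Set.add s x) t := rfl
      rw [List.foldl_cons, ih, hup]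
      cases h : PySem.Set.contains s x with
      | true =>
          have hlen := pv_len_add_of_contains s x h
          have hle := pv_len_update_le t (PySem.Set.add s x)
          have hne : ¬ (PySem.Set.update (PySem.Set.add s x) t).length = s.length + (t.length + 1) := by
            omega
          simp
          exact Or.inr hne
      | false =>
          have hlen := pv_len_add_of_not_contains s x h
          have harith : s.length + 1 + t.length = s.length + (t.length + 1) := by omega
          simp only [Bool.or_false, List.length_cons, hlen, harith]
          rfl

-- ===== VERDICT (by name: the statement is the Claim_ definition above) =====
theorem check_for_duplicate_sku_spec : Claim_equal_check_for_duplicate_sku := by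
  intro pub_items _ _
  unfold Spec_check_for_duplicate_sku check_for_duplicate_sku check_for_duplicate_sku_alt
  rw [← List.foldl_map (f := pvSku)
        (g := fun (acc : Bool × PySem.Set String) x =>
          (acc.1 || PySem.Set.contains acc.2 x, PySem.Set.add acc.2 x))]
  rw [pv_foldl_dup]
  have hof : PySem.Set.update (PySem.Set.empty : PySem.Set String) (pub_items.map pvSku)
      = PySem.Set.ofList (pub_items.map pvSku) := rfl
  rw [hof]
  by_cases h : (PySem.Set.ofList (pub_items.map pvSku)).length = pub_items.length
  · simp [PySem.Set.empty, h]
  · have h2 : ¬ pub_items.length = (PySem.Set.ofList (pub_items.map pvSku)).length :=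
      fun hh => h hh.symm
    simp [PySem.Set.empty, h, h2]
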